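-- pv_equiv track=rewrite | github.com/zaleni/MagicBot-VGA | src/lerobot/policies/cubev2/modeling_internvla_a1.py | infer_token_grid
-- ===== SOURCE A (Python) =====
-- import math
--
-- def infer_token_grid(num_tokens: int) -> tuple[int, int]:
--     """Factorizes token count into a near-square 2D grid."""
--
--     if num_tokens <= 0:
--         raise ValueError(f"num_tokens must be positive, got {num_tokens}")
--
--     best_h, best_w = 1, num_tokens
--     for height in range(1, math.isqrt(num_tokens) + 1):
--         if num_tokens % height != 0:
--             continue
--         width = num_tokens // height
--         if abs(width - height) < abs(best_w - best_h):
--             best_h, best_w = height, width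
--     return best_h, best_w
-- ===== SOURCE B (Python) =====
-- import math
--
-- def infer_token_grid(num_tokens: int) -> tuple[int, int]:
--     """Factorizes token count into a near-square 2D grid."""
--     if num_tokens <= 0:
--         raise ValueError(f"num_tokens must be positive, got {num_tokens}")
--     for height in range(math.isqrt(num_tokens), 0, -1):
--         if num_tokens % height == 0:
--             return height, num_tokens // height
-- ===== Notes on version B (the rewrite author's own statement) =====
-- stated objective: simpler
-- what changed: B scans heights downward from isqrt(n) and returns at the first divisor found (which is provably the near-square one), dropping A's best_h/best_w accumulator and abs-difference comparison entirely.
import Mathlib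
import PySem

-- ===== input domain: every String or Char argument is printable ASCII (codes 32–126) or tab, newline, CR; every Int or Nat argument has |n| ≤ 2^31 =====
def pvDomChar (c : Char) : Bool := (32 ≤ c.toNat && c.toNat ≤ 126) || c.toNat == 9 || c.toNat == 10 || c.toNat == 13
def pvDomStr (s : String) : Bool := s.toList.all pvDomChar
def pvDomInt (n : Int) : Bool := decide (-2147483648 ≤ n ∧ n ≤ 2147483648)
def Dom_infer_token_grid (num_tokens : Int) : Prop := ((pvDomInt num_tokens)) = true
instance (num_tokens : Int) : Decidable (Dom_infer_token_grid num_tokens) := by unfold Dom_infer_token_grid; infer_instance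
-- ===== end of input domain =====

-- B replaces A's ascending scan with best-accumulator by a descending scan from isqrt(n)
-- returning at the first divisor (objective: simpler). Equivalence on all num_tokens ≥ 1.

-- ===== PORT A =====
-- loop body of A's `for height in range(1, isqrt(n)+1)` loop
def gridStep (n : Int) (best : Int × Int) (height : Int) : Int × Int :=
  if PySem.Int.mod n height ≠ 0 then best
  else
    let width := PySem.Int.floordiv n height
    if |width - height| < |best.2 - best.1| then (height, width) else best

def infer_token_grid (num_tokens : Int) : Int × Int :=
  -- math.isqrt(num_tokens) ported as Nat.sqrt (exact for num_tokens ≥ 0; Pre_ gives ≥ 1)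
  (PySem.List.pyRange 1 ((Nat.sqrt num_tokens.toNat : Int) + 1) 1).foldl
    (gridStep num_tokens) (1, num_tokens)

-- ===== PORT B =====
-- B's `for height in range(isqrt(n), 0, -1)` with early return, as descending recursion;
-- the base case 0 (Python's loop falling through) is unreachable for num_tokens ≥ 1.
def altGo (n : Int) : Nat → Int × Int
  | 0 => (1, n)
  | h + 1 =>
      if PySem.Int.mod n ((h : Int) + 1) = 0 then
        ((h : Int) + 1, PySem.Int.floordiv n ((h : Int) + 1))
      else altGo n h

def infer_token_grid_alt (num_tokens : Int) : Int × Int :=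
  altGo num_tokens (Nat.sqrt num_tokens.toNat)

-- ===== PRECONDITION & SPEC =====
-- Pre_ excludes num_tokens ≤ 0, on which A raises ValueError.
def Pre_infer_token_grid (num_tokens : Int) : Prop := 1 ≤ num_tokens
instance (num_tokens : Int) : Decidable (Pre_infer_token_grid num_tokens) := by
  unfold Pre_infer_token_grid; infer_instance

def pvWitness_infer_token_grid : Int := 12

def Spec_infer_token_grid (num_tokens : Int) (out : Int × Int) : Prop :=
  out = infer_token_grid_alt num_tokens
instance (num_tokens : Int) (out : Int × Int) : Decidable (Spec_infer_token_grid num_tokens out) := by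
  unfold Spec_infer_token_grid; infer_instance

-- ===== CLAIM (what is proved, stated in full; the proofs are below) =====
def Claim_equal_infer_token_grid : Prop :=
  ∀ (num_tokens : Int), Dom_infer_token_grid num_tokens →
    Pre_infer_token_grid num_tokens →
    Spec_infer_token_grid num_tokens (infer_token_grid num_tokens)

-- ===== LEMMAS AND PROOFS =====

-- altGo at k ≥ 1 returns (d, n // d) for some divisor d of n with 1 ≤ d ≤ k
lemma altGo_spec (n : Int) :
    ∀ k : Nat, 1 ≤ k →
      ∃ d : Int, altGo n k = (d, PySem.Int.floordiv n d) ∧ 1 ≤ d ∧ d ≤ (k : Int) ∧ d ∣ n := by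
  intro k hk
  induction k with
  | zero => omega
  | succ h ih =>
    by_cases hm : PySem.Int.mod n ((h : Int) + 1) = 0
    · refine ⟨(h : Int) + 1, ?_, by omega, by push_cast; omega,
        (PySem.Int.mod_eq_zero_iff_dvd n _).mp hm⟩
      simp only [altGo]
      rw [if_pos hm]
    · rcases Nat.eq_zero_or_pos h with h0 | hpos
      · subst h0
        exfalso
        apply hm
        simpa using (PySem.Int.mod_eq_zero_iff_dvd n 1).mpr (one_dvd n)
      · obtain ⟨d, hd, h1, h2, h3⟩ := ih hpos
        refine ⟨d, ?_, h1, by omega, h3⟩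
        simp only [altGo]
        rw [if_neg hm]
        exact hd

-- the key arithmetic: a new divisor K strictly improves on any smaller divisor d, K*K ≤ n
lemma improves (n d K : Int) (hn : 1 ≤ n) (hd1 : 1 ≤ d) (hdK : d < K)
    (hdvd : d ∣ n) (hKdvd : K ∣ n) (hKK : K * K ≤ n) :
    |PySem.Int.floordiv n K - K| < |PySem.Int.floordiv n d - d| := by
  have hd0 : (0:Int) < d := hd1
  have hK0 : (0:Int) < K := by omega
  rw [PySem.Int.floordiv_eq_ediv_of_pos hK0, PySem.Int.floordiv_eq_ediv_of_pos hd0]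
  have hq1 : d * (n / d) = n := Int.mul_ediv_cancel' hdvd
  have hq2 : K * (n / K) = n := Int.mul_ediv_cancel' hKdvd
  set q1 := n / d with hq1d
  set q2 := n / K with hq2d
  have hq2pos : 0 < q2 := by nlinarith
  have hKq2 : K ≤ q2 := le_of_mul_le_mul_left (show K * K ≤ K * q2 by nlinarith) hK0
  have hq2q1 : q2 < q1 :=
    lt_of_mul_lt_mul_left
      (show d * q2 < d * q1 by nlinarith [mul_pos (show (0:Int) < K - d by omega) hq2pos])
      (by omega : (0:Int) ≤ d)
  rw [abs_of_nonneg (by omega : (0:Int) ≤ q2 - K), abs_of_nonneg (by omega : (0:Int) ≤ q1 - d)]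
  omega

lemma fold_eq_altGo (n : Int) (hn : 1 ≤ n) :
    ∀ k : Nat, 1 ≤ k → (k : Int) * (k : Int) ≤ n →
      (PySem.List.pyRange 1 ((k : Int) + 1) 1).foldl (gridStep n) (1, n) = altGo n k := by
  intro k hk
  induction k with
  | zero => omega
  | succ h ih =>
    intro hkk
    rcases Nat.eq_zero_or_pos h with h0 | hpos
    · subst h0
      rw [show ((1:Nat) : Int) + 1 = 1 + 1 by norm_num, PySem.List.pyRange_one_singleton]
      simp [List.foldl, gridStep, altGo]
    · have hK : ((h : Int) + 1) * ((h : Int) + 1) ≤ n := by push_cast at hkk ⊢; omega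
      have hstep : ((h.succ : Int) + 1) = ((h : Int) + 1) + 1 := by push_cast; ring
      rw [hstep, PySem.List.pyRange_one_succ_right (by push_cast; omega), List.foldl_append]
      have hhh : (h : Int) * (h : Int) ≤ n := by nlinarith
      rw [ih hpos hhh]
      obtain ⟨d, hd, hd1, hdk, hdvd⟩ := altGo_spec n h hpos
      rw [hd, List.foldl_cons, List.foldl_nil]
      by_cases hm : PySem.Int.mod n ((h : Int) + 1) = 0
      · have hKdvd : ((h : Int) + 1) ∣ n := (PySem.Int.mod_eq_zero_iff_dvd n _).mp hm
        have himp := improves n d ((h : Int) + 1) hn hd1 (by omega) hdvd hKdvd hK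
        unfold gridStep
        rw [if_neg (by simpa using hm), if_pos himp]
        simp only [altGo]
        rw [if_pos hm]
      · unfold gridStep
        rw [if_pos hm]
        simp only [altGo]
        rw [if_neg hm]
        exact hd.symm

-- ===== VERDICT (by name: the statement is the Claim_ definition above) =====
theorem infer_token_grid_spec : Claim_equal_infer_token_grid := by
  intro n _ hpre
  have hp : 1 ≤ n := hpre
  unfold Spec_infer_token_grid infer_token_grid infer_token_grid_alt
  have hn1 : 1 ≤ n.toNat := by omega
  have hs1 : 1 ≤ Nat.sqrt n.toNat := by
    calc 1 = Nat.sqrt 1 := by norm_num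
    _ ≤ Nat.sqrt n.toNat := Nat.sqrt_le_sqrt hn1
  have hss : (Nat.sqrt n.toNat : Int) * (Nat.sqrt n.toNat : Int) ≤ n := by
    have hsq : Nat.sqrt n.toNat * Nat.sqrt n.toNat ≤ n.toNat := by
      have h := Nat.sqrt_le' n.toNat
      rwa [pow_two] at h
    have hcast : ((Nat.sqrt n.toNat * Nat.sqrt n.toNat : Nat) : Int) ≤ (n.toNat : Int) :=
      Int.ofNat_le.mpr hsq
    push_cast at hcast
    omega
  exact fold_eq_altGo n hp (Nat.sqrt n.toNat) hs1 hss
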